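-- pv_equiv track=rewrite | github.com/Gavin0099/ai-governance-framework | runtime_hooks/core/post_task_check.py | _is_protected_non_authoritative_field
-- ===== SOURCE A (Python) =====
-- PROTECTED_NON_AUTHORITATIVE_FIELDS = {
--     "token_count",
--     "token_observability_level",
--     "token_source_summary",
--     "provenance_warning",
--     "decision_safety",
-- }
--
-- def _is_protected_non_authoritative_field(field_name: str) -> bool:
--     normalized = str(field_name or "").strip()
--     if not normalized:
--         return False
--     for protected in PROTECTED_NON_AUTHORITATIVE_FIELDS:
--         if normalized == protected or normalized.startswith(f"{protected}."):
--             return True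
--     return False
-- ===== SOURCE B (Python) =====
-- PROTECTED_NON_AUTHORITATIVE_FIELDS = {
--     "token_count",
--     "token_observability_level",
--     "token_source_summary",
--     "provenance_warning",
--     "decision_safety",
-- }
--
--
-- def _is_protected_non_authoritative_field(field_name: str) -> bool:
--     normalized = str(field_name or "").strip()
--     if not normalized:
--         return False
--     dot = normalized.find(".")
--     head = normalized if dot < 0 else normalized[:dot]
--     return head in PROTECTED_NON_AUTHORITATIVE_FIELDS
-- ===== Notes on version B (the rewrite author's own statement) =====
-- stated objective: simpler
-- what changed: Instead of scanning the protected set and testing equality/prefix per entry, B computes the text before the first dot once and does a single set-membership test (valid because no protected name contains a dot).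
import Mathlib
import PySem

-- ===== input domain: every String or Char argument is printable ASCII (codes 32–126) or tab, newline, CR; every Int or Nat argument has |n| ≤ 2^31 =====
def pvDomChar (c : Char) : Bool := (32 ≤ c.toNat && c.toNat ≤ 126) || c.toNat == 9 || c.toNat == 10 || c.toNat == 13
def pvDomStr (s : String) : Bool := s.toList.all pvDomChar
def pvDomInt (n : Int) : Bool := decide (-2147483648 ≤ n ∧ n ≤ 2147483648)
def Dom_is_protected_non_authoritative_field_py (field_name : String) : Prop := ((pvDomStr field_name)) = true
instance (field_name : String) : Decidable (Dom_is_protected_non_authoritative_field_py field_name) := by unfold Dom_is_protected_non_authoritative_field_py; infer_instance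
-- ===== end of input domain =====

-- B replaces A's per-entry equality/prefix scan over the protected set by computing the text
-- before the first dot once and doing a single membership test (objective: simpler).


-- shared module constant PROTECTED_NON_AUTHORITATIVE_FIELDS (a Python set of distinct strings)
def pvProtectedFields : List String :=
  ["token_count", "token_observability_level", "token_source_summary",
   "provenance_warning", "decision_safety"]

-- ===== PORT A =====
-- str(field_name or "") is field_name itself when field_name is a (possibly empty) String
def is_protected_non_authoritative_field_py (field_name : String) : Bool :=
  let normalized := PySem.Str.strip field_name
  if normalized = "" then false
  else
    pvProtectedFields.any (fun protected_ =>
      normalized == protected_ || PySem.Str.startswith normalized (protected_ ++ "."))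

-- ===== PORT B =====
def is_protected_non_authoritative_field_py_alt (field_name : String) : Bool :=
  let normalized := PySem.Str.strip field_name
  if normalized = "" then false
  else
    let dot := PySem.Str.find normalized "."
    let head := if dot < 0 then normalized else PySem.Str.slice normalized none (some dot)
    pvProtectedFields.contains head

-- ===== PRECONDITION & SPEC =====
def Spec_is_protected_non_authoritative_field_py (field_name : String) (out : Bool) : Prop := out = is_protected_non_authoritative_field_py_alt field_name
instance (field_name : String) (out : Bool) : Decidable (Spec_is_protected_non_authoritative_field_py field_name out) := by unfold Spec_is_protected_non_authoritative_field_py; infer_instance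

-- ===== CLAIM (what is proved, stated in full; the proofs are below) =====
def Claim_equal_is_protected_non_authoritative_field_py : Prop := ∀ (field_name : String), Dom_is_protected_non_authoritative_field_py field_name → Spec_is_protected_non_authoritative_field_py field_name (is_protected_non_authoritative_field_py field_name)

-- ===== LEMMAS AND PROOFS =====

-- takeWhile (≠ '.') of a list equals a dot-free p iff the list is p or starts with p followed by '.'
theorem pv_takeWhile_iff (p : List Char) (hp : '.' ∉ p) :
    ∀ (l : List Char),
      (l.takeWhile (fun c => decide (c ≠ '.')) = p) ↔ (l = p ∨ ∃ t, l = p ++ '.' :: t) := by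
  intro l
  induction l generalizing p with
  | nil =>
    simp only [List.takeWhile_nil]
    constructor
    · rintro rfl; left; rfl
    · rintro (rfl | ⟨t, ht⟩)
      · rfl
      · exact absurd ht (by simp)
  | cons c l' ih =>
    by_cases hc : c = '.'
    · subst hc
      rw [List.takeWhile_cons_of_neg (by simp)]
      constructor
      · rintro rfl
        right; exact ⟨l', rfl⟩
      · rintro (h | ⟨t, ht⟩)
        · exfalso; exact hp (h ▸ List.mem_cons_self)
        · cases p with
          | nil => rfl
          | cons d p' =>
            exfalso
            have hd : '.' = d := by simpa using congrArg (·.head?) ht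
            exact hp (hd ▸ List.mem_cons_self)
    · rw [List.takeWhile_cons_of_pos (by simp [hc])]
      cases p with
      | nil =>
        constructor
        · intro h; exact absurd h (by simp)
        · rintro (h | ⟨t, ht⟩)
          · exact absurd (congrArg (·.head?) h) (by simp)
          · have : c = '.' := by simpa using congrArg (·.head?) ht
            exact absurd this hc
      | cons d p' =>
        have hp' : '.' ∉ p' := fun h => hp (List.mem_cons_of_mem _ h)
        constructor
        · intro h
          obtain ⟨rfl, h2⟩ := List.cons_eq_cons.mp h
          rcases (ih p' hp').mp h2 with h3 | ⟨t, ht⟩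
          · left; rw [h3]
          · right; exact ⟨t, by rw [ht]; rfl⟩
        · rintro (h | ⟨t, ht⟩)
          · obtain ⟨rfl, h2⟩ := List.cons_eq_cons.mp h
            exact congrArg (c :: ·) ((ih p' hp').mpr (Or.inl h2))
          · obtain ⟨rfl, ht'⟩ := List.cons_eq_cons.mp ht
            exact congrArg (c :: ·) ((ih p' hp').mpr (Or.inr ⟨t, ht'⟩))

-- the A-side test for one dot-free protected name, in terms of takeWhile
theorem pv_key (l p : List Char) (hp : '.' ∉ p) :
    (decide (l = p) || PySem.Chars.startswith l (p ++ ['.'])) =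
      decide (l.takeWhile (fun c => decide (c ≠ '.')) = p) := by
  rw [Bool.eq_iff_iff]
  simp only [Bool.or_eq_true, decide_eq_true_eq, PySem.Chars.startswith_iff]
  rw [pv_takeWhile_iff p hp l]
  constructor
  · rintro (rfl | ⟨t, ht⟩)
    · exact Or.inl rfl
    · exact Or.inr ⟨t, by rw [← ht]; simp⟩
  · rintro (rfl | ⟨t, ht⟩)
    · exact Or.inl rfl
    · exact Or.inr ⟨t, by rw [ht]; simp⟩

-- take up to the first '.' equals takeWhile (≠ '.')
theorem pv_take_eq_takeWhile (l : List Char) (n : Nat)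
    (hmem : l[n]? = some '.') (hmin : ∀ i, i < n → l[i]? ≠ some '.') :
    l.take n = l.takeWhile (fun c => decide (c ≠ '.')) := by
  induction l generalizing n with
  | nil => simp at hmem
  | cons c l' ih =>
    cases n with
    | zero =>
      simp only [List.getElem?_cons_zero, Option.some.injEq] at hmem
      subst hmem
      rw [List.take_zero, List.takeWhile_cons_of_neg (by simp)]
    | succ n' =>
      have hc : c ≠ '.' := fun h => hmin 0 (Nat.succ_pos _) (by simp [h])
      simp only [List.getElem?_cons_succ] at hmem
      rw [List.take_succ_cons, List.takeWhile_cons_of_pos (by simp [hc])]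
      rw [ih n' hmem (fun i hi => by
        have := hmin (i + 1) (Nat.succ_lt_succ hi)
        simpa using this)]

-- B's head, on lists: it is takeWhile (≠ '.')
theorem pv_head_eq (l : List Char) :
    (if PySem.Chars.find l ['.'] < 0 then l
     else PySem.List.slice l none (some (PySem.Chars.find l ['.']))) =
      l.takeWhile (fun c => decide (c ≠ '.')) := by
  by_cases h : PySem.Chars.find l ['.'] < 0
  · rw [if_pos h]
    have hni : ¬ ['.'] <:+: l := by
      rw [← PySem.Chars.find_eq_neg_one_iff]
      have h1 := PySem.Chars.neg_one_le_find l ['.']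
      omega
    have hmem : '.' ∉ l := by
      intro hm
      obtain ⟨s, t, rfl⟩ := List.append_of_mem hm
      exact hni ⟨s, t, by simp⟩
    rw [List.takeWhile_eq_self_iff.mpr (fun x hx => by
      simp only [decide_eq_true_eq, ne_eq]
      rintro rfl; exact hmem hx)]
  · rw [if_neg h]
    set d := PySem.Chars.find l ['.'] with hd
    have hne : d ≠ -1 := by omega
    have hle : d ≤ l.length := hd ▸ PySem.Chars.find_le_length l ['.']
    have hspec := PySem.Chars.findFrom_natCast_spec l ['.'] 0 (Nat.zero_le _)
      (by rw [Nat.cast_zero, PySem.Chars.findFrom_zero]; exact hne)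
    rw [Nat.cast_zero, PySem.Chars.findFrom_zero, ← hd] at hspec
    obtain ⟨-, hpre, hmin⟩ := hspec
    rw [PySem.List.slice_to l (by omega)]
    apply pv_take_eq_takeWhile
    · obtain ⟨t, ht⟩ := hpre
      have : (l.drop d.toNat).head? = some '.' := by rw [← ht]; simp
      rwa [List.head?_drop] at this
    · intro i hi hsome
      refine hmin i (Nat.zero_le _) hi ⟨l.drop (i + 1), ?_⟩
      have hh : (l.drop i).head? = some '.' := by rw [List.head?_drop]; exact hsome
      obtain ⟨t, ht⟩ := List.head?_eq_some_iff.mp hh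
      rw [ht]
      simp only [List.singleton_append, List.cons.injEq, true_and]
      have := congrArg List.tail ht
      simpa [List.tail_drop] using this

theorem pv_beq_toList (s t : String) : (s == t) = decide (s.toList = t.toList) := by
  rw [Bool.eq_iff_iff]; simp [← String.toList_inj]

-- the A-side test for one protected String equals the B-side comparison of heads
theorem pv_str_key (n p : String) (hp : '.' ∉ p.toList) :
    (n == p || PySem.Str.startswith n (p ++ ".")) =
      ((if PySem.Str.find n "." < 0 then n
        else PySem.Str.slice n none (some (PySem.Str.find n "."))) == p) := by
  rw [pv_beq_toList, pv_beq_toList]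
  have hf : PySem.Str.find n "." = PySem.Chars.find n.toList ['.'] := by
    rw [PySem.Str.find_eq]; rfl
  have htl : (if PySem.Str.find n "." < 0 then n
      else PySem.Str.slice n none (some (PySem.Str.find n "."))).toList =
      (if PySem.Chars.find n.toList ['.'] < 0 then n.toList
       else PySem.List.slice n.toList none (some (PySem.Chars.find n.toList ['.']))) := by
    rw [hf]
    split
    · rfl
    · rw [PySem.Str.toList_slice]
      simp
  rw [htl, pv_head_eq]
  rw [show PySem.Str.startswith n (p ++ ".") =
      PySem.Chars.startswith n.toList (p.toList ++ ['.']) by simp]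
  exact pv_key n.toList p.toList hp

-- ===== VERDICT (by name: the statement is the Claim_ definition above) =====
theorem is_protected_non_authoritative_field_py_spec : Claim_equal_is_protected_non_authoritative_field_py := by
  intro field_name _
  unfold Spec_is_protected_non_authoritative_field_py
  unfold is_protected_non_authoritative_field_py is_protected_non_authoritative_field_py_alt
  set n := PySem.Str.strip field_name with hn
  by_cases h : n = ""
  · simp [h]
  · rw [if_neg h, if_neg h]
    simp only [pvProtectedFields, List.any_cons, List.any_nil, List.contains_cons,
      List.contains_nil, Bool.or_false]
    rw [pv_str_key n "token_count" (by decide),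
        pv_str_key n "token_observability_level" (by decide),
        pv_str_key n "token_source_summary" (by decide),
        pv_str_key n "provenance_warning" (by decide),
        pv_str_key n "decision_safety" (by decide)]
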